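-- pv_equiv track=rewrite | github.com/xwhzz/tilelang | tilelang/schedule/gpu/element_wise.py | _tile_aligns_with_suffix
-- ===== SOURCE A (Python) =====
-- def _tile_aligns_with_suffix(s_extents: list[int | None], tile: int) -> bool:
--     """Check that tile divides the product of some *proper* suffix of s_extents.
--
--     When fusing dims (d0, d1, ..., dn) and splitting by *tile*, the tile
--     boundaries align with the original dimension boundaries only if *tile*
--     divides d_{k} * d_{k+1} * ... * d_{n} for some k > 0 (i.e. not all
--     dims).  If only the full product (k=0) is divisible, the tile still
--     crosses intermediate dimension boundaries and cache_read_at creates a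
--     fragment with non-affine access patterns.
--
--     For a single spatial dim, divisibility of the extent itself suffices.
--
--     When dynamic extents are present, we check the *static* innermost
--     suffix.  If the product of all contiguous static dims starting from
--     the innermost already divides by tile, alignment is guaranteed
--     regardless of the dynamic dims.  Otherwise we conservatively return
--     False — the tile may cross dimension boundaries and produce
--     block-dependent fragment shapes that crash LayoutInference.
--     """
--     if not s_extents:
--         return True
--     has_dynamic = any(e is None for e in s_extents)
--     if not has_dynamic:
--         if len(s_extents) <= 1:
--             return s_extents[0] % tile == 0
--         suffix_product = 1
--         for e in reversed(s_extents[1:]):  # skip outermost dim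
--             suffix_product *= e
--             if suffix_product % tile == 0:
--                 return True
--         return False
--     # Dynamic case: check the contiguous static innermost suffix.
--     # If those known dims already align with the tile, we're safe.
--     suffix_product = 1
--     for e in reversed(s_extents):
--         if e is None:
--             break
--         suffix_product *= e
--         if suffix_product % tile == 0:
--             return True
--     return False
-- ===== SOURCE B (Python) =====
-- def _gcd(a: int, b: int) -> int:
--     a, b = abs(a), abs(b)
--     while b:
--         a, b = b, a % b
--     return a
--
--
-- def _tile_aligns_with_suffix(s_extents: list[int | None], tile: int) -> bool:
--     # gcd-peeling: keep the still-uncovered part t of the tile and strip from it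
--     # what each relevant innermost dim can cover; aligned as soon as t == 1.
--     if not s_extents:
--         return True
--     if None in s_extents:
--         dims = []
--         for e in reversed(s_extents):
--             if e is None:
--                 break
--             dims.append(e)
--     elif len(s_extents) == 1:
--         dims = s_extents
--     else:
--         dims = s_extents[:0:-1]  # reversed, skipping the outermost dim
--     t = abs(tile)
--     for e in dims:
--         t //= _gcd(t, e)
--         if t == 1:
--             return True
--     return False
-- ===== Notes on version B (the rewrite author's own statement) =====
-- stated objective: alternative
-- what changed: Replaces the growing suffix-product accumulator (whose divisibility by tile is re-tested each step) with gcd-based tile peeling: maintain the still-uncovered part t of |tile|, divide it by gcd(t, dim) for each relevant innermost dim, and succeed as soon as t reaches 1; the dim list (innermost static suffix resp. all-but-outermost) is selected up front instead of inside two separate loops.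
-- outside the precondition, e.g. on _tile_aligns_with_suffix([2, 3], 0): A raises ZeroDivisionError, B returns False
import Mathlib
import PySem

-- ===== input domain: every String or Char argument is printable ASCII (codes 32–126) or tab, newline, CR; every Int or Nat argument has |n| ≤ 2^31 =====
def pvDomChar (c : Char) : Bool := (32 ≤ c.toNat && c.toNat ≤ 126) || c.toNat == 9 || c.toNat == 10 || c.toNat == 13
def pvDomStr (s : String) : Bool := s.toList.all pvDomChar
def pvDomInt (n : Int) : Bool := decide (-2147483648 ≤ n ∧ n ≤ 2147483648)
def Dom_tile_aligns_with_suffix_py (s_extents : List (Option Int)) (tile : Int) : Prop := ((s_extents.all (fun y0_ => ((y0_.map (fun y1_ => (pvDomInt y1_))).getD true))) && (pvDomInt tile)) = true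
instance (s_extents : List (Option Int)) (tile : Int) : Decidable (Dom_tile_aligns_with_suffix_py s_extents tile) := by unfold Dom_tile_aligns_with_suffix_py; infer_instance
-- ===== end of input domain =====

-- B replaces A's growing suffix-product accumulator with gcd-peeling of the tile
-- (same traversal, bounded numbers); alternative decomposition, not claimed faster.

-- ===== PORT A =====

-- static multi-dim loop: 'for e in reversed(s_extents[1:]): suffix_product *= e; if … return True'
-- (elements are ints here — no None in this branch — so '.getD 0' only unwraps)
def pvAStatic (tile : Int) : List (Option Int) → Int → Bool
  | [], _ => false
  | e :: rest, p =>
      let p' := p * e.getD 0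
      if PySem.Int.mod p' tile = 0 then true else pvAStatic tile rest p'

-- dynamic loop: 'for e in reversed(s_extents): if e is None: break; …'
def pvADyn (tile : Int) : List (Option Int) → Int → Bool
  | [], _ => false
  | none :: _, _ => false
  | some e :: rest, p =>
      let p' := p * e
      if PySem.Int.mod p' tile = 0 then true else pvADyn tile rest p'

def tile_aligns_with_suffix_py (s_extents : List (Option Int)) (tile : Int) : Bool :=
  if s_extents = [] then true
  else if s_extents.any (·.isNone) = false then
    if s_extents.length ≤ 1 then
      -- 's_extents[0] % tile == 0'; the single element is an int in this branch
      decide (PySem.Int.mod ((s_extents.headD none).getD 0) tile = 0)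
    else pvAStatic tile (s_extents.drop 1).reverse 1
  else pvADyn tile s_extents.reverse 1

-- ===== PORT B =====

-- '_gcd': Euclid's loop 'while b: a, b = b, a % b' on absolute values
def pvGcdNat : Nat → Nat → Nat
  | a, 0 => a
  | a, b + 1 => pvGcdNat (b + 1) (a % (b + 1))
termination_by _a b => b
decreasing_by exact Nat.mod_lt _ (Nat.succ_pos b)

def pvGcd (a b : Int) : Int := Int.ofNat (pvGcdNat a.natAbs b.natAbs)

-- dynamic dims: 'for e in reversed(s_extents): if e is None: break; dims.append(e)'
def pvTakeStatic : List (Option Int) → List Int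
  | [] => []
  | none :: _ => []
  | some e :: rest => e :: pvTakeStatic rest

-- 'for e in dims: t //= _gcd(t, e); if t == 1: return True'
def pvPeel : List Int → Int → Bool
  | [], _ => false
  | e :: rest, t =>
      let t' := PySem.Int.floordiv t (pvGcd t e)
      if t' = 1 then true else pvPeel rest t'

def tile_aligns_with_suffix_py_alt (s_extents : List (Option Int)) (tile : Int) : Bool :=
  if s_extents = [] then true
  else
    let dims : List Int :=
      if s_extents.any (·.isNone) then pvTakeStatic s_extents.reverse
      else if s_extents.length = 1 then s_extents.filterMap id   -- all elements are ints here
      else ((s_extents.drop 1).reverse).filterMap id             -- 's_extents[:0:-1]'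
    pvPeel dims (tile.natAbs : Int)

-- ===== PRECONDITION & SPEC =====

-- Pre_ excludes exactly the inputs where A raises ZeroDivisionError: tile == 0 with a
-- nonempty list whose innermost (last) extent is static (A then evaluates '% 0').
def Pre_tile_aligns_with_suffix_py (s_extents : List (Option Int)) (tile : Int) : Prop :=
  tile ≠ 0 ∨ s_extents = [] ∨ s_extents.getLast? = some none
instance (s_extents : List (Option Int)) (tile : Int) : Decidable (Pre_tile_aligns_with_suffix_py s_extents tile) := by unfold Pre_tile_aligns_with_suffix_py; infer_instance

def pvWitness_tile_aligns_with_suffix_py : List (Option Int) × Int := ([some 2, some 4], 4)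

def Spec_tile_aligns_with_suffix_py (s_extents : List (Option Int)) (tile : Int) (out : Bool) : Prop := out = tile_aligns_with_suffix_py_alt s_extents tile
instance (s_extents : List (Option Int)) (tile : Int) (out : Bool) : Decidable (Spec_tile_aligns_with_suffix_py s_extents tile out) := by unfold Spec_tile_aligns_with_suffix_py; infer_instance

-- ===== CLAIM (what is proved, stated in full; the proofs are below) =====
def Claim_equal_tile_aligns_with_suffix_py : Prop := ∀ (s_extents : List (Option Int)) (tile : Int), Dom_tile_aligns_with_suffix_py s_extents tile → Pre_tile_aligns_with_suffix_py s_extents tile → Spec_tile_aligns_with_suffix_py s_extents tile (tile_aligns_with_suffix_py s_extents tile)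

-- ===== LEMMAS AND PROOFS =====

lemma pvGcdNat_eq_gcd (a b : Nat) : pvGcdNat a b = Nat.gcd a b := by
  induction a, b using pvGcdNat.induct with
  | case1 a => simp [pvGcdNat]
  | case2 a b ih =>
      rw [pvGcdNat, ih, Nat.gcd_comm (b + 1), ← Nat.gcd_rec, Nat.gcd_comm]

-- greedy single-step peeling: for t ≠ 0, (t / gcd t e) ∣ x ↔ t ∣ e * x (Nat version)
lemma nat_step (t e x : Nat) (ht : t ≠ 0) : t / Nat.gcd t e ∣ x ↔ t ∣ e * x := by
  set g := Nat.gcd t e with hg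
  have hgpos : 0 < g := Nat.gcd_pos_of_pos_left e (Nat.pos_of_ne_zero ht)
  have hco : Nat.Coprime (t / g) (e / g) := Nat.coprime_div_gcd_div_gcd hgpos
  have h1 : t = g * (t / g) := (Nat.mul_div_cancel' (Nat.gcd_dvd_left t e)).symm
  have h2 : e = g * (e / g) := (Nat.mul_div_cancel' (Nat.gcd_dvd_right t e)).symm
  constructor
  · intro h
    rw [h1]; conv_rhs => rw [h2]
    rw [Nat.mul_assoc]
    exact Nat.mul_dvd_mul_left g (h.trans (Dvd.intro_left _ rfl))
  · intro h
    have : g * (t / g) ∣ g * ((e / g) * x) := by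
      rw [← Nat.mul_assoc, ← h2, ← h1]; exact h
    have h3 : t / g ∣ (e / g) * x := (Nat.mul_dvd_mul_iff_left hgpos).mp this
    rw [Nat.mul_comm] at h3
    exact (Nat.Coprime.dvd_mul_right hco).mp h3

lemma floordiv_gcd_eq (t e : Int) (ht : 0 < t) :
    PySem.Int.floordiv t (pvGcd t e) = ((t.natAbs / Nat.gcd t.natAbs e.natAbs : Nat) : Int) := by
  have hg : pvGcd t e = (Nat.gcd t.natAbs e.natAbs : Int) := by
    simp [pvGcd, pvGcdNat_eq_gcd]
  rw [hg]
  have : t = (t.natAbs : Int) := by omega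
  rw [this]
  exact_mod_cast PySem.Int.floordiv_natCast t.natAbs (Nat.gcd t.natAbs e.natAbs)

-- the same step on Int, phrased on B's actual 't //= _gcd(t, e)'
lemma int_step (t e x : Int) (ht : 0 < t) :
    PySem.Int.floordiv t (pvGcd t e) ∣ x ↔ t ∣ e * x := by
  have htn : t.natAbs ≠ 0 := by omega
  rw [floordiv_gcd_eq t e ht]
  have hx : ((t.natAbs / Nat.gcd t.natAbs e.natAbs : Nat) : Int) ∣ x ↔
      t.natAbs / Nat.gcd t.natAbs e.natAbs ∣ x.natAbs := by
    rw [← Int.natAbs_dvd_natAbs, Int.natAbs_natCast]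
  have hex : t ∣ e * x ↔ t.natAbs ∣ e.natAbs * x.natAbs := by
    rw [← Int.natAbs_dvd_natAbs, Int.natAbs_mul]
  rw [hx, hex]
  exact nat_step _ _ _ htn

lemma peel_pos (t e : Int) (ht : 0 < t) : 0 < PySem.Int.floordiv t (pvGcd t e) := by
  rw [floordiv_gcd_eq t e ht]
  have htn : t.natAbs ≠ 0 := by omega
  have hgpos : 0 < Nat.gcd t.natAbs e.natAbs :=
    Nat.gcd_pos_of_pos_left e.natAbs (Nat.pos_of_ne_zero htn)
  have : 0 < t.natAbs / Nat.gcd t.natAbs e.natAbs :=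
    Nat.div_pos (Nat.le_of_dvd (Nat.pos_of_ne_zero htn) (Nat.gcd_dvd_left _ _)) hgpos
  exact_mod_cast this

lemma peel_one_iff (t e : Int) (ht : 0 < t) :
    (PySem.Int.floordiv t (pvGcd t e) = 1) ↔ t ∣ e := by
  constructor
  · intro h
    have h1 := (int_step t e 1 ht).mp (by rw [h])
    rwa [mul_one] at h1
  · intro h
    have h1 : PySem.Int.floordiv t (pvGcd t e) ∣ 1 := by
      rw [int_step t e 1 ht, mul_one]; exact h
    exact Int.eq_one_of_dvd_one (le_of_lt (peel_pos t e ht)) h1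

-- dynamic loop of A versus B's peel over the taken static suffix
lemma peel_dyn (tile : Int) :
    ∀ (l : List (Option Int)) (p t : Int), 0 < t → (∀ x : Int, t ∣ x ↔ tile ∣ p * x) →
      pvADyn tile l p = pvPeel (pvTakeStatic l) t := by
  intro l
  induction l with
  | nil => intro p t _ _; simp [pvADyn, pvTakeStatic, pvPeel]
  | cons o rest ih =>
      intro p t ht hinv
      cases o with
      | none => simp [pvADyn, pvTakeStatic, pvPeel]
      | some e =>
          simp only [pvADyn, pvTakeStatic, pvPeel]
          have hcond : (PySem.Int.mod (p * e) tile = 0) ↔ (PySem.Int.floordiv t (pvGcd t e) = 1) := by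
            rw [PySem.Int.mod_eq_zero_iff_dvd, ← hinv e, ← peel_one_iff t e ht]
          by_cases h : PySem.Int.floordiv t (pvGcd t e) = 1
          · simp [h, hcond.mpr h]
          · have hA : ¬ PySem.Int.mod (p * e) tile = 0 := fun hc => h (hcond.mp hc)
            simp only [hA, h, if_false]
            exact ih (p * e) _ (peel_pos t e ht) (by
              intro x
              rw [int_step t e x ht, hinv (e * x), mul_assoc])

-- static loop of A (over all-int lists) versus B's peel
lemma peel_static (tile : Int) :
    ∀ (l : List (Option Int)), (∀ o ∈ l, o ≠ none) →
      ∀ p t : Int, 0 < t → (∀ x : Int, t ∣ x ↔ tile ∣ p * x) →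
      pvAStatic tile l p = pvPeel (l.filterMap id) t := by
  intro l
  induction l with
  | nil => intro _ p t _ _; simp [pvAStatic, pvPeel]
  | cons o rest ih =>
      intro hall p t ht hinv
      cases o with
      | none => exact absurd rfl (hall none (by simp))
      | some e =>
          simp only [pvAStatic, pvPeel, List.filterMap_cons, id, Option.getD_some]
          have hcond : (PySem.Int.mod (p * e) tile = 0) ↔ (PySem.Int.floordiv t (pvGcd t e) = 1) := by
            rw [PySem.Int.mod_eq_zero_iff_dvd, ← hinv e, ← peel_one_iff t e ht]
          by_cases h : PySem.Int.floordiv t (pvGcd t e) = 1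
          · simp [h, hcond.mpr h]
          · have hA : ¬ PySem.Int.mod (p * e) tile = 0 := fun hc => h (hcond.mp hc)
            simp only [hA, h, if_false]
            exact ih (fun o ho => hall o (List.mem_cons_of_mem _ ho)) (p * e) _
              (peel_pos t e ht) (by intro x; rw [int_step t e x ht, hinv (e * x), mul_assoc])

-- ===== VERDICT (by name: the statement is the Claim_ definition above) =====
theorem tile_aligns_with_suffix_py_spec : Claim_equal_tile_aligns_with_suffix_py := by
  intro s tile _hdom hpre
  unfold Spec_tile_aligns_with_suffix_py tile_aligns_with_suffix_py tile_aligns_with_suffix_py_alt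
  by_cases hnil : s = []
  · simp [hnil]
  · simp only [hnil, if_false]
    by_cases hdyn : s.any (·.isNone)
    · -- dynamic branch
      simp only [hdyn, Bool.true_eq_false, if_false, if_true]
      by_cases htile : tile = 0
      · -- Pre_ forces the innermost extent to be None; both loops stop at once
        have hlast : s.getLast? = some none := by
          rcases hpre with h | h | h
          · exact absurd htile h
          · exact absurd h hnil
          · exact h
        have hrev : s.reverse.head? = some none := by
          rw [List.head?_reverse]; exact hlast
        cases hr : s.reverse with
        | nil => rw [hr] at hrev; simp at hrev
        | cons o tl =>
            rw [hr] at hrev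
            simp only [List.head?_cons, Option.some.injEq] at hrev
            subst hrev
            simp [pvADyn, pvTakeStatic, pvPeel]
      · exact peel_dyn tile s.reverse 1 ((tile.natAbs : Nat) : Int) (by omega)
          (fun x => by rw [one_mul, Int.natAbs_dvd])
    · -- static branch
      have hall : ∀ o ∈ s, o ≠ none := by
        intro o ho hno
        subst hno
        exact hdyn (by rw [List.any_eq_true]; exact ⟨none, ho, rfl⟩)
      have htile : tile ≠ 0 := by
        rcases hpre with h | h | h
        · exact h
        · exact absurd h hnil
        · exact absurd rfl (hall none (List.mem_of_getLast? h))
      have hdyn' : s.any (·.isNone) = false := Bool.eq_false_iff.mpr hdyn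
      simp only [hdyn', Bool.false_eq_true, if_true, if_false]
      have hpos : (0 : Int) < ((tile.natAbs : Nat) : Int) := by omega
      by_cases hlen : s.length ≤ 1
      · -- single static dim
        have hlen1 : s.length = 1 := by
          cases s with
          | nil => exact absurd rfl hnil
          | cons o tl => simp at hlen ⊢; omega
        obtain ⟨o, rfl⟩ : ∃ o, s = [o] := by
          cases s with
          | nil => exact absurd rfl hnil
          | cons o tl =>
              cases tl with
              | nil => exact ⟨o, rfl⟩
              | cons _ _ => simp at hlen1
        obtain ⟨e, rfl⟩ : ∃ e, o = some e := by
          cases o with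
          | none => exact absurd rfl (hall none (by simp))
          | some e => exact ⟨e, rfl⟩
        simp only [hlen1, if_true]
        have habs : (0 : Int) < |tile| := abs_pos.mpr htile
        have hiff : (PySem.Int.mod e tile = 0)
            ↔ (PySem.Int.floordiv |tile| (pvGcd |tile| e) = 1) := by
          rw [PySem.Int.mod_eq_zero_iff_dvd, peel_one_iff _ e habs, abs_dvd]
        simp only [List.headD_cons, Option.getD_some, List.filterMap_cons, id,
          List.filterMap_nil, pvPeel, Int.natCast_natAbs]
        by_cases h : PySem.Int.floordiv |tile| (pvGcd |tile| e) = 1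
        · rw [if_pos h]; exact decide_eq_true (hiff.mpr h)
        · rw [if_neg h]; exact decide_eq_false (fun hc => h (hiff.mp hc))
      · -- two or more static dims
        have hlen1 : ¬ s.length = 1 := by omega
        simp only [hlen, if_false, hlen1]
        exact peel_static tile (s.drop 1).reverse
          (fun o ho => hall o (List.mem_of_mem_drop (List.mem_reverse.mp ho)))
          1 ((tile.natAbs : Nat) : Int) hpos
          (fun x => by rw [one_mul, Int.natAbs_dvd])
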